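-- pv_equiv track=rewrite | github.com/ohdnf/algo-study | programmers/2018_kakao_blind_recruit/비밀지도_장현준.py | solution
-- ===== SOURCE A (Python) =====
-- def solution(n, arr1, arr2):
--     # 벽(#) => arr = arr1 || arr2
--     arr = []
--     # default는 " "로 놓고, 해당되는 곳만 "#"로 변환
--     for idx in range(n):
--         num1 = arr1[idx]
--         num2 = arr2[idx]
--         temp = [" "] * n
--         for i in range(1, n+1):
--             if num1 % 2 or num2 % 2:
--                 temp[-i] = "#"
--             num1, num2 = num1 // 2, num2 // 2
--             # 둘다 0이여서 계속 계산할 필요 X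
--             if not num1 and not num2:
--                 break
--         arr.append(temp)
--     # 공백만을 포함한 스트링을 합치기 위해서, 일일히 구현
--     answer = []
--     for a in arr:
--         st = ""
--         for s in a:
--             st += s
--         answer.append(st)
--     return answer
-- ===== SOURCE B (Python) =====
-- def solution(n, arr1, arr2):
--     # Idiomatic: modular reduction + standard binary formatting + translation table,
--     # instead of A's per-row mutable char array painted by a %2-//2 loop and a join pass.
--     tr = str.maketrans('10', '# ')
--     return [format((arr1[i] | arr2[i]) % (1 << n), 'b').zfill(n).translate(tr)
--             for i in range(n)]
-- ===== Notes on version B (the rewrite author's own statement) =====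
-- stated objective: idiomatic
-- what changed: B replaces A's per-row mutable character array painted by a repeated %2-//2 bit-extraction loop with break plus a separate manual concatenation pass by reducing each row's whole-number OR modulo 2^n and formatting it with the standard library (format(...,'b').zfill(n)) followed by a '1'/'0'->'#'/' ' translation table.
import Mathlib
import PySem

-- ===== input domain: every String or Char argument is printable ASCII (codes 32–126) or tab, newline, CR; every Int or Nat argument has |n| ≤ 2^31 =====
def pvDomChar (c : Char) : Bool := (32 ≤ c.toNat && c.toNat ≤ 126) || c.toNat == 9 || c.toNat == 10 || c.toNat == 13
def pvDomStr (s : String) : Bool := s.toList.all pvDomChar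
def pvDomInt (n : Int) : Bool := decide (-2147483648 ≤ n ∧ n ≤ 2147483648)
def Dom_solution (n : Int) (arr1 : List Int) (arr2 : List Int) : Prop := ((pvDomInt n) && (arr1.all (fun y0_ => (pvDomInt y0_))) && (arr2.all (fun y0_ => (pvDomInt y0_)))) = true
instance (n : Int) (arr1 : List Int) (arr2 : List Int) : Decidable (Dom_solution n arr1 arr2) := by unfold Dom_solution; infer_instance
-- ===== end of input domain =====

-- B renders each row by reducing the whole-row OR modulo 2^n and formatting it as a zero-padded
-- binary string whose digits are then translated to '#'/' ' — replacing A's mutable char array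
-- painted by a %2-//2 loop with break, plus A's separate manual join pass (objective: idiomatic).

-- ===== PORT A =====
-- the inner 'for i in range(1, n+1): … break' loop of A
def pvInner : List Int → List String → Int → Int → List String
  | [], temp, _, _ => temp
  | i :: rest, temp, num1, num2 =>
    let temp' := if PySem.Int.mod num1 2 ≠ 0 ∨ PySem.Int.mod num2 2 ≠ 0
                 then PySem.List.pySetD temp (-i) "#" else temp
    let n1 := PySem.Int.floordiv num1 2
    let n2 := PySem.Int.floordiv num2 2
    if n1 = 0 ∧ n2 = 0 then temp' else pvInner rest temp' n1 n2

def solution (n : Int) (arr1 : List Int) (arr2 : List Int) : List String :=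
  let arr : List (List String) :=
    (PySem.List.pyRange 0 n 1).foldl
      (fun acc idx =>
        acc ++ [pvInner (PySem.List.pyRange 1 (n+1) 1) (List.replicate n.toNat " ")
                  (PySem.List.pyGetD arr1 idx 0) (PySem.List.pyGetD arr2 idx 0)]) []
  arr.foldl (fun answer a => answer ++ [a.foldl (fun st s => st ++ s) ""]) []

-- ===== PORT B =====
-- format(t, 'b') for t ≥ 0: binary digits, most significant first, '0' for 0.
-- Nat.digits 2 is the corresponding Mathlib digit function (least significant first).
def pvBinChars (t : Nat) : List Char :=
  if t = 0 then ['0']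
  else ((Nat.digits 2 t).map (fun d => if d = 1 then '1' else '0')).reverse

-- str.zfill(n) on a digit string: left-pad with '0' to width n
def pvZfill (n : Nat) (s : List Char) : List Char :=
  List.replicate (n - s.length) '0' ++ s

-- str.translate(str.maketrans('10', '# ')): a per-character map (chars outside the table are kept)
def pvTr (c : Char) : Char := if c = '1' then '#' else if c = '0' then ' ' else c

def solution_alt (n : Int) (arr1 : List Int) (arr2 : List Int) : List String :=
  (PySem.List.pyRange 0 n 1).map (fun i =>
    -- t = (arr1[i] | arr2[i]) % (1 << n); 1 << n is 2^n
    let t := (PySem.Int.mod (PySem.Int.bor (PySem.List.pyGetD arr1 i 0) (PySem.List.pyGetD arr2 i 0))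
                (2 ^ n.toNat)).toNat
    String.ofList ((pvZfill n.toNat (pvBinChars t)).map pvTr))

-- ===== PRECONDITION & SPEC =====
-- A raises IndexError (arr1[idx] / arr2[idx]) when n exceeds the length of either list; Pre_ excludes exactly that.
def Pre_solution (n : Int) (arr1 : List Int) (arr2 : List Int) : Prop :=
  n ≤ (arr1.length : Int) ∧ n ≤ (arr2.length : Int)
instance (n : Int) (arr1 : List Int) (arr2 : List Int) : Decidable (Pre_solution n arr1 arr2) := by unfold Pre_solution; infer_instance

def pvWitness_solution : Int × List Int × List Int := (2, [9, 20], [30, 1])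

def Spec_solution (n : Int) (arr1 : List Int) (arr2 : List Int) (out : List String) : Prop := out = solution_alt n arr1 arr2
instance (n : Int) (arr1 : List Int) (arr2 : List Int) (out : List String) : Decidable (Spec_solution n arr1 arr2 out) := by unfold Spec_solution; infer_instance

-- ===== CLAIM (what is proved, stated in full; the proofs are below) =====
def Claim_equal_solution : Prop := ∀ (n : Int) (arr1 : List Int) (arr2 : List Int), Dom_solution n arr1 arr2 → Pre_solution n arr1 arr2 → Spec_solution n arr1 arr2 (solution n arr1 arr2)

-- ===== LEMMAS AND PROOFS =====

-- the bit of v at shift e (arbitrary-precision two's complement), as a Bool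
def pvBit (v : Int) (e : Nat) : Bool := PySem.Int.band (v >>> e) 1 != 0

lemma pv_mod2 (x : Int) : PySem.Int.mod x 2 = x % 2 :=
  PySem.Int.mod_eq_emod_of_pos (by norm_num)

lemma pv_div2 (x : Int) : PySem.Int.floordiv x 2 = x / 2 :=
  PySem.Int.floordiv_eq_ediv_of_pos (by norm_num)

lemma pv_shift_one (v : Int) : v >>> (1 : Nat) = PySem.Int.floordiv v 2 := by
  rw [pv_div2]
  simpa using Int.shiftRight_eq_div_pow v 1

lemma pv_shift_succ (v : Int) (e : Nat) :
    v >>> (e + 1) = (PySem.Int.floordiv v 2) >>> e := by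
  rw [← pv_shift_one, ← Int.shiftRight_add, Nat.add_comm]

-- parity of a Python bitwise OR
lemma pv_bor_mod_two (a b : Int) :
    (PySem.Int.bor a b) % 2 ≠ 0 ↔ (a % 2 ≠ 0 ∨ b % 2 ≠ 0) := by
  unfold PySem.Int.bor
  by_cases ha : 0 ≤ a <;> by_cases hb : 0 ≤ b <;>
    simp only [ha, hb, if_pos, if_neg, not_false_iff]
  · have h := @Nat.or_mod_two_eq_one a.toNat b.toNat
    omega
  · have h := @Nat.and_mod_two_eq_one ((-b - 1).toNat) a.toNat
    have hle := Nat.and_le_left (n := (-b - 1).toNat) (m := a.toNat)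
    omega
  · have h := @Nat.and_mod_two_eq_one ((-a - 1).toNat) b.toNat
    have hle := Nat.and_le_left (n := (-a - 1).toNat) (m := b.toNat)
    omega
  · have h := @Nat.and_mod_two_eq_one ((-a - 1).toNat) ((-b - 1).toNat)
    omega

-- halving commutes with Python bitwise OR
lemma pv_bor_div_two (a b : Int) :
    (PySem.Int.bor a b) / 2 = PySem.Int.bor (a / 2) (b / 2) := by
  unfold PySem.Int.bor
  by_cases ha : 0 ≤ a <;> by_cases hb : 0 ≤ b
  · rw [if_pos ha, if_pos hb, if_pos (by positivity), if_pos (by positivity)]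
    have h1 : (a / 2).toNat = a.toNat / 2 := by omega
    have h2 : (b / 2).toNat = b.toNat / 2 := by omega
    rw [h1, h2, ← Nat.or_div_two]
    omega
  · rw [if_pos ha, if_neg hb, if_pos (by positivity), if_neg (by omega)]
    have h2 : (-(b / 2) - 1).toNat = (-b - 1).toNat / 2 := by omega
    have h1 : (a / 2).toNat = a.toNat / 2 := by omega
    rw [h1, h2, ← Nat.and_div_two]
    have hle := Nat.and_le_left (n := (-b - 1).toNat) (m := a.toNat)
    have hm := @Nat.and_mod_two_eq_one ((-b - 1).toNat) a.toNat
    omega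
  · rw [if_neg ha, if_pos hb, if_neg (by omega), if_pos (by positivity)]
    have h1 : (-(a / 2) - 1).toNat = (-a - 1).toNat / 2 := by omega
    have h2 : (b / 2).toNat = b.toNat / 2 := by omega
    rw [h1, h2, ← Nat.and_div_two]
    have hle := Nat.and_le_left (n := (-a - 1).toNat) (m := b.toNat)
    have hm := @Nat.and_mod_two_eq_one ((-a - 1).toNat) b.toNat
    omega
  · rw [if_neg ha, if_neg hb, if_neg (by omega), if_neg (by omega)]
    have h1 : (-(a / 2) - 1).toNat = (-a - 1).toNat / 2 := by omega
    have h2 : (-(b / 2) - 1).toNat = (-b - 1).toNat / 2 := by omega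
    rw [h1, h2, ← Nat.and_div_two]
    omega

lemma pvBit_zero (v : Int) : pvBit v 0 = (v % 2 != 0) := by
  simp [pvBit, Int.shiftRight_zero, PySem.Int.band_one]

lemma pvBit_succ (v : Int) (e : Nat) : pvBit v (e + 1) = pvBit (v / 2) e := by
  rw [pvBit, pvBit, pv_shift_succ, pv_div2]

lemma pvBit_bor_zero_iff (a b : Int) :
    pvBit (PySem.Int.bor a b) 0 = true ↔ (PySem.Int.mod a 2 ≠ 0 ∨ PySem.Int.mod b 2 ≠ 0) := by
  rw [pvBit_zero]
  simp only [pv_mod2, bne_iff_ne]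
  exact pv_bor_mod_two a b

lemma pvBit_bor_high_false (a b : Int) (e : Nat)
    (ha : PySem.Int.floordiv a 2 = 0) (hb : PySem.Int.floordiv b 2 = 0) :
    pvBit (PySem.Int.bor a b) (e + 1) = false := by
  rw [pvBit_succ, pv_bor_div_two, ← pv_div2, ← pv_div2, ha, hb]
  simp [pvBit, Int.zero_shiftRight, PySem.Int.band_one]

lemma pv_setNeg (temp : List String) (i0 : Int) (h1 : 1 ≤ i0) (h2 : i0 ≤ (temp.length : Int)) (v : String) :
    PySem.List.pySetD temp (-i0) v = temp.set (temp.length - i0.toNat) v := by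
  unfold PySem.List.pySetD PySem.List.pySet? PySem.List.pyIdx?
  rw [if_neg (by omega), if_pos (by omega)]
  simp only [Option.map_some, Option.getD_some]
  congr 1
  omega

lemma pvInner_length : ∀ (is : List Int) (temp : List String) (a b : Int),
    (pvInner is temp a b).length = temp.length := by
  intro is
  induction is with
  | nil => intro temp a b; rfl
  | cons i rest ih =>
    intro temp a b
    simp only [pvInner]
    split
    · split <;> simp [PySem.List.length_pySetD]
    · rw [ih]
      split <;> simp [PySem.List.length_pySetD]

lemma pvInner_get : ∀ (k : Nat) (i0 : Int) (temp : List String) (a b : Int),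
    1 ≤ i0 → i0 + (k : Int) = (temp.length : Int) + 1 →
    ∀ (p : Nat) (hp : p < temp.length),
    (pvInner (PySem.List.pyRange i0 ((temp.length : Int) + 1) 1) temp a b)[p]? =
      some (if p + i0.toNat ≤ temp.length ∧ pvBit (PySem.Int.bor a b) (temp.length - p - i0.toNat) = true
            then "#" else temp[p]'hp) := by
  intro k
  induction k with
  | zero =>
    intro i0 temp a b h1 h2 p hp
    rw [PySem.List.pyRange_one_eq_nil (by omega)]
    simp only [pvInner]
    rw [List.getElem?_eq_getElem hp, if_neg (by omega)]
  | succ k ih =>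
    intro i0 temp a b h1 h2 p hp
    rw [PySem.List.pyRange_one_cons (by omega)]
    simp only [pvInner]
    rw [pv_setNeg temp i0 h1 (by omega) "#"]
    set C := (PySem.Int.mod a 2 ≠ 0 ∨ PySem.Int.mod b 2 ≠ 0) with hC
    set temp' := if C then temp.set (temp.length - i0.toNat) "#" else temp with htd
    have hlen' : temp'.length = temp.length := by
      rw [htd]; split <;> simp
    have hget' : temp'[p]? =
        some (if p = temp.length - i0.toNat ∧ C then "#" else temp[p]) := by
      rw [htd]
      by_cases hc : C
      · rw [if_pos hc, List.getElem?_set]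
        by_cases hpe : temp.length - i0.toNat = p
        · rw [if_pos hpe, if_pos (by omega), if_pos ⟨hpe.symm, hc⟩]
        · rw [if_neg hpe, if_neg (by tauto), List.getElem?_eq_getElem hp]
      · rw [if_neg hc, if_neg (by tauto), List.getElem?_eq_getElem hp]
    have hpl : p < temp'.length := by omega
    have hgE : temp'[p]'hpl = (if p = temp.length - i0.toNat ∧ C then "#" else temp[p]'hp) := by
      have h := hget'
      rw [List.getElem?_eq_getElem hpl] at h
      exact Option.some.inj h
    by_cases hbrk : PySem.Int.floordiv a 2 = 0 ∧ PySem.Int.floordiv b 2 = 0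
    · rw [if_pos hbrk, hget']
      congr 1
      by_cases hpe : p = temp.length - i0.toNat
      · have he : temp.length - p - i0.toNat = 0 := by omega
        rw [he]
        by_cases hc : C
        · rw [if_pos ⟨hpe, hc⟩, if_pos ⟨by omega, (pvBit_bor_zero_iff a b).2 hc⟩]
        · rw [if_neg (by tauto), if_neg (by
            rintro ⟨-, hbit⟩
            exact hc ((pvBit_bor_zero_iff a b).1 hbit))]
      · rw [if_neg (by tauto)]
        by_cases hlt : p + i0.toNat ≤ temp.length
        · rw [if_neg (by
            rintro ⟨-, hbit⟩
            rw [show temp.length - p - i0.toNat = (temp.length - p - i0.toNat - 1) + 1 from by omega,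
                pvBit_bor_high_false a b _ hbrk.1 hbrk.2] at hbit
            exact Bool.false_ne_true hbit)]
        · rw [if_neg (by omega)]
    · rw [if_neg hbrk]
      rw [show ((temp.length : Int) + 1) = ((temp'.length : Int) + 1) from by rw [hlen']]
      rw [ih (i0 + 1) temp' (PySem.Int.floordiv a 2) (PySem.Int.floordiv b 2)
            (by omega) (by omega) p (by omega)]
      rw [hlen', hgE]
      congr 1
      have hbor : PySem.Int.bor (PySem.Int.floordiv a 2) (PySem.Int.floordiv b 2) =
          (PySem.Int.bor a b) / 2 := by
        rw [pv_bor_div_two, pv_div2, pv_div2]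
      by_cases hpe : p = temp.length - i0.toNat
      · rw [if_neg (by omega)]
        have he : temp.length - p - i0.toNat = 0 := by omega
        rw [he]
        by_cases hc : C
        · rw [if_pos ⟨hpe, hc⟩, if_pos ⟨by omega, (pvBit_bor_zero_iff a b).2 hc⟩]
        · rw [if_neg (by tauto), if_neg (by
            rintro ⟨-, hbit⟩
            exact hc ((pvBit_bor_zero_iff a b).1 hbit))]
      · rw [show (if p = temp.length - i0.toNat ∧ C then ("#" : String) else temp[p]'hp) = temp[p]'hp
              from if_neg (by tauto)]
        by_cases hlt : p + i0.toNat ≤ temp.length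
        · rw [hbor, show temp.length - p - (i0 + 1).toNat = temp.length - p - i0.toNat - 1 from by omega,
              ← pvBit_succ,
              show temp.length - p - i0.toNat - 1 + 1 = temp.length - p - i0.toNat from by omega]
          by_cases hbit : pvBit (PySem.Int.bor a b) (temp.length - p - i0.toNat) = true
          · rw [if_pos ⟨by omega, hbit⟩, if_pos ⟨by omega, hbit⟩]
          · rw [if_neg (by tauto), if_neg (by tauto)]
        · rw [if_neg (by omega), if_neg (by omega)]

lemma pv_join_toList : ∀ (ss : List String) (init : String),
    (ss.foldl (fun st s => st ++ s) init).toList = init.toList ++ ss.flatMap String.toList := by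
  intro ss
  induction ss with
  | nil => intro init; simp
  | cons s rest ih =>
    intro init
    simp only [List.foldl_cons, List.flatMap_cons, ih, String.toList_append]
    simp [List.append_assoc]

-- B-side arithmetic: dividing an emod by 2 peels one binary digit
lemma pv_emod_two_mul_div_two (v c : Int) (hc : 0 < c) : v % (2*c) / 2 = v / 2 % c := by
  have hq0 : 0 ≤ v/2 % c := Int.emod_nonneg _ (by omega)
  have hq1 : v/2 % c < c := Int.emod_lt_of_pos _ hc
  have E : v % (2*c) = 2*(v/2 % c) + v % 2 := by
    conv_lhs => rw [show v = 2*(v/2) + v%2 from by omega]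
    rw [Int.add_emod, Int.mul_emod_mul_of_pos _ _ (by norm_num : (0:Int) < 2),
        show v%2 % (2*c) = v%2 from Int.emod_eq_of_lt (by omega) (by omega)]
    exact Int.emod_eq_of_lt (by omega) (by omega)
  omega

-- the low nn bits of v % 2^nn are exactly v's two's-complement bits
lemma pv_testBit_emod : ∀ (e nn : Nat) (v : Int), e < nn →
    Nat.testBit ((v % ((2:Int)^nn)).toNat) e = pvBit v e := by
  intro e
  induction e with
  | zero =>
    intro nn v he
    have hpos : (0:Int) < (2:Int)^nn := by positivity
    have hnn : 0 ≤ v % ((2:Int)^nn) := Int.emod_nonneg _ (by omega)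
    have hdvd : (2:Int) ∣ (2:Int)^nn := dvd_pow_self 2 (by omega)
    have h2 : v % ((2:Int)^nn) % 2 = v % 2 := Int.emod_emod_of_dvd v hdvd
    rw [Nat.testBit_zero, pvBit_zero]
    have hto : (v % ((2:Int)^nn)).toNat % 2 = (v % 2).toNat := by omega
    have hv : v % 2 = 0 ∨ v % 2 = 1 := by omega
    rcases hv with hv | hv <;> simp [hto, hv]
  | succ e ih =>
    intro nn v he
    obtain ⟨m, rfl⟩ : ∃ m, nn = m + 1 := ⟨nn - 1, by omega⟩
    have hc : (0:Int) < (2:Int)^m := by positivity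
    have hpos : (0:Int) < (2:Int)^(m+1) := by positivity
    have hnn : 0 ≤ v % ((2:Int)^(m+1)) := Int.emod_nonneg _ (by omega)
    rw [Nat.testBit_add_one, pvBit_succ]
    have hdiv : (v % ((2:Int)^(m+1))).toNat / 2 = ((v % ((2:Int)^(m+1))) / 2).toNat := by omega
    rw [hdiv, show ((2:Int)^(m+1)) = 2 * (2:Int)^m from by ring,
        pv_emod_two_mul_div_two v _ hc]
    exact ih m (v / 2) (by omega)

-- format-then-zfill produces exactly the n-bit big-endian rendering of t
lemma pv_pad_bin : ∀ (n : Nat) (t : Nat), 1 ≤ n → t < 2^n →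
    pvZfill n (pvBinChars t) =
      (List.range n).map (fun j => if Nat.testBit t (n-1-j) then '1' else '0') := by
  intro n
  induction n with
  | zero => intro t h; omega
  | succ n ih =>
    intro t hn ht
    by_cases ht0 : t = 0
    · subst ht0
      simp [pvZfill, pvBinChars, ← List.replicate_succ' (n := n), Nat.zero_testBit]
    · have hdig : Nat.digits 2 t = t % 2 :: Nat.digits 2 (t / 2) :=
        Nat.digits_def' (by norm_num) (Nat.pos_of_ne_zero ht0)
      by_cases hq0 : t / 2 = 0
      · have ht1 : t = 1 := by omega
        subst ht1
        have hb : pvBinChars 1 = ['1'] := by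
          simp [pvBinChars, hq0]
        rw [hb]
        rw [List.range_succ, List.map_append]
        have hlast : (List.map (fun j => if Nat.testBit 1 (n+1-1-j) then '1' else '0') [n]) = ['1'] := by
          simp
        rw [hlast]
        have hrest : (List.range n).map (fun j => if Nat.testBit 1 (n+1-1-j) then '1' else '0')
            = List.replicate n '0' := by
          rw [List.eq_replicate_iff]
          constructor
          · simp
          · intro c hc
            rw [List.mem_map] at hc
            obtain ⟨j, hj, rfl⟩ := hc
            rw [List.mem_range] at hj
            rw [show (1:Nat) = 2^0 from rfl, Nat.testBit_two_pow]
            rw [if_neg (by simp; omega)]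
        rw [hrest]
        simp [pvZfill]
      · -- t ≥ 2
        have hq1 : 1 ≤ t / 2 := Nat.pos_of_ne_zero hq0
        have hn1 : 1 ≤ n := by
          by_contra h
          have : n = 0 := by omega
          subst this
          omega
        have hqlt : t / 2 < 2^n := by
          have := ht
          rw [pow_succ] at this
          omega
        have hsplit : pvBinChars t = pvBinChars (t / 2) ++ [if t % 2 = 1 then '1' else '0'] := by
          simp only [pvBinChars, if_neg ht0, if_neg hq0, hdig]
          simp
        have hzf : pvZfill (n+1) (pvBinChars t)
            = pvZfill n (pvBinChars (t / 2)) ++ [if t % 2 = 1 then '1' else '0'] := by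
          rw [hsplit]
          simp only [pvZfill, List.length_append, List.length_singleton]
          rw [show n + 1 - ((pvBinChars (t/2)).length + 1) = n - (pvBinChars (t/2)).length from by omega]
          simp [List.append_assoc]
        rw [hzf, ih (t / 2) hn1 hqlt]
        rw [List.range_succ, List.map_append]
        congr 1
        · apply List.map_congr_left
          intro j hj
          rw [List.mem_range] at hj
          rw [show n + 1 - 1 - j = (n - 1 - j) + 1 from by omega, Nat.testBit_add_one]
        · have hb0 : Nat.testBit t 0 = decide (t % 2 = 1) := Nat.testBit_zero t
          simp [hb0]

-- the per-row equality: A's painted-and-joined row equals B's formatted-and-translated row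
lemma pv_row_eq (n : Int) (hn : 1 ≤ n) (a b : Int) :
    (pvInner (PySem.List.pyRange 1 (n + 1) 1) (List.replicate n.toNat " ") a b).foldl
        (fun st s => st ++ s) "" =
    String.ofList ((pvZfill n.toNat (pvBinChars
        (PySem.Int.mod (PySem.Int.bor a b) (2 ^ n.toNat)).toNat)).map pvTr) := by
  have hL : ((List.replicate n.toNat (" " : String)).length : Int) = n := by
    simp; omega
  have hres : pvInner (PySem.List.pyRange 1 (n + 1) 1) (List.replicate n.toNat " ") a b =
      (List.range n.toNat).map
        (fun p => if pvBit (PySem.Int.bor a b) (n.toNat - 1 - p) = true then "#" else " ") := by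
    apply List.ext_getElem?
    intro p
    rcases lt_or_ge p n.toNat with hp | hp
    · have hg := pvInner_get n.toNat 1 (List.replicate n.toNat " ") a b (by omega)
        (by rw [hL]; omega) p (by simpa using hp)
      simp only [List.length_replicate, List.getElem_replicate] at hg
      rw [show ((n.toNat : Nat) : Int) = n from by omega] at hg
      rw [hg, List.getElem?_map, List.getElem?_range hp]
      simp only [Option.map_some, Option.some.injEq]
      rw [show n.toNat - p - (1 : Int).toNat = n.toNat - 1 - p from by omega]
      by_cases hb : pvBit (PySem.Int.bor a b) (n.toNat - 1 - p) = true
      · rw [if_pos ⟨by omega, hb⟩, if_pos hb]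
      · rw [if_neg (by tauto), if_neg hb]
    · rw [List.getElem?_eq_none (by rw [pvInner_length]; simpa using hp),
          List.getElem?_eq_none (by simpa using hp)]
  -- B side: reduce the formatted string to the same position map
  set v := PySem.Int.bor a b with hv
  have hpos : (0:Int) < (2:Int)^n.toNat := by positivity
  have hmod : PySem.Int.mod v (2 ^ n.toNat) = v % ((2:Int)^n.toNat) :=
    PySem.Int.mod_eq_emod_of_pos hpos
  have htlt : (v % ((2:Int)^n.toNat)).toNat < 2^n.toNat := by
    have h1 : 0 ≤ v % ((2:Int)^n.toNat) := Int.emod_nonneg _ (by omega)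
    have h2 : v % ((2:Int)^n.toNat) < (2:Int)^n.toNat := Int.emod_lt_of_pos _ hpos
    have hc : ((2^n.toNat : Nat) : Int) = (2:Int)^n.toNat := by push_cast; ring
    omega
  rw [hres, hmod, pv_pad_bin n.toNat _ (by omega) htlt]
  apply String.toList_inj.1
  rw [pv_join_toList, show ("".toList : List Char) = [] from rfl, List.nil_append,
      String.toList_ofList, List.map_map, List.flatMap_map]
  have hone : ∀ (c : Prop) [Decidable c],
      ((if c then ("#" : String) else " ").toList) = [if c then '#' else ' '] := by
    intro c _
    split <;> decide
  simp only [hone]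
  rw [show (fun p => [if pvBit v (n.toNat - 1 - p) = true then '#' else ' '])
        = (fun p => [(fun q => if pvBit v (n.toNat - 1 - q) = true then '#' else ' ') p]) from rfl,
      ← List.map_eq_flatMap]
  apply List.map_congr_left
  intro k hk
  rw [List.mem_range] at hk
  simp only [Function.comp]
  rw [pv_testBit_emod (n.toNat - 1 - k) n.toNat v (by omega)]
  by_cases hb : pvBit v (n.toNat - 1 - k) = true
  · rw [if_pos hb]; simp [hb, pvTr]
  · rw [if_neg hb]
    simp only [Bool.not_eq_true] at hb
    simp [hb, pvTr]

-- ===== VERDICT (by name: the statement is the Claim_ definition above) =====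
theorem solution_spec : Claim_equal_solution := by
  intro n arr1 arr2 _hdom _hpre
  simp only [Spec_solution, solution, solution_alt]
  rw [PySem.List.foldl_append_singleton_eq_map
        (f := fun idx => pvInner (PySem.List.pyRange 1 (n+1) 1) (List.replicate n.toNat " ")
                (PySem.List.pyGetD arr1 idx 0) (PySem.List.pyGetD arr2 idx 0))]
  rw [List.nil_append]
  rw [PySem.List.foldl_append_singleton_eq_map
        (f := fun a : List String => a.foldl (fun st s => st ++ s) "")]
  rw [List.nil_append, List.map_map]
  apply List.map_congr_left
  intro idx hidx
  rw [PySem.List.mem_pyRange_one] at hidx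
  simp only [Function.comp]
  exact pv_row_eq n (by omega) _ _
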